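-- pv_equiv track=rewrite | github.com/pypi-data/pypi-mirror-383 | packages/mcp-on-demand-tools/mcp_on_demand_tools-0.1.0-py3-none-any.whl/mcp_on_demand_tools/server.py | _extract_goose_output
-- ===== SOURCE A (Python) =====
-- def _extract_goose_output(goose_stdout: str) -> str:
--     """Extracts the final result from Goose's stdout, filtering out debug lines."""
--     if not goose_stdout.strip():
--         return ""
--     lines = goose_stdout.strip().split('\n')
--     try:
--         # Find the line containing "working directory:" and take everything after it
--         idx = next(i for i, line in enumerate(lines) if "working directory:" in line)
--         final_result = "\n".join(lines[idx+1:]).strip()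
--         return final_result
--     except StopIteration:
--         # If the marker isn't found for some reason, fall back to just the last line
--         return lines[-1]
-- ===== SOURCE B (Python) =====
-- def _extract_goose_output(goose_stdout: str) -> str:
--     """Extracts the final result from Goose's stdout, filtering out debug lines."""
--     stripped = goose_stdout.strip()
--     if not stripped:
--         return ""
--     marker = "working directory:"
--     f = stripped.find(marker)
--     if f == -1:
--         # Marker absent: fall back to the last line.
--         r = stripped.rfind('\n')
--         return stripped if r == -1 else stripped[r + 1:]
--     after = stripped[f + len(marker):]
--     if '\n' not in after:
--         # Marker sits on the last line: nothing after it.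
--         return ""
--     return after[after.find('\n') + 1:].strip()
-- ===== Notes on version B (the rewrite author's own statement) =====
-- stated objective: idiomatic
-- what changed: B drops the line-list representation entirely: instead of splitting stdout into lines, scanning them with enumerate/next and re-joining a tail slice, it locates the first marker occurrence with str.find and works with string index slicing (rfind for the fallback last line), one pass over the string and no intermediate list.
import Mathlib
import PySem

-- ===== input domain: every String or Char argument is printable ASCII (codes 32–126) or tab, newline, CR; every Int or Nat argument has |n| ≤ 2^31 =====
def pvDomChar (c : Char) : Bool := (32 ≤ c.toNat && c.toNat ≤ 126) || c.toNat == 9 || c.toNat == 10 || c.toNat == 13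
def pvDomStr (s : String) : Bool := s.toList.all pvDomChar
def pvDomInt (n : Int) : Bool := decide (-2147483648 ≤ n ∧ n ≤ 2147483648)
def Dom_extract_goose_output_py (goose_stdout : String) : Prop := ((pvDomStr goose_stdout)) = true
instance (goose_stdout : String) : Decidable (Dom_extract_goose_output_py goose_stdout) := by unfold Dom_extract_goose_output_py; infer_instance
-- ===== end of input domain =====

-- B replaces A's split-into-lines / enumerate / re-join pipeline by direct string index
-- arithmetic with find/rfind and slicing; same return value, no line list built.

-- ===== PORT A =====
def extract_goose_output_py (goose_stdout : String) : String :=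
  let stripped := (PySem.Str.strip goose_stdout).toList
  if stripped.isEmpty then ""
  else
    let lines := PySem.Chars.splitOn stripped ['\n']
    -- next(i for i, line in enumerate(lines) if "working directory:" in line), StopIteration → none
    match lines.findIdx? (fun line => PySem.Chars.isIn "working directory:".toList line) with
    | some idx => String.ofList (PySem.Chars.strip (PySem.Chars.join ['\n'] (lines.drop (idx + 1))))
    | none => String.ofList ((PySem.List.pyGet? lines (-1)).getD [])
      -- lines[-1]; str.split never yields an empty list, so the .getD default is dead

-- ===== PORT B =====
def extract_goose_output_py_alt (goose_stdout : String) : String :=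
  let stripped := (PySem.Str.strip goose_stdout).toList
  if stripped.isEmpty then ""
  else
    let marker := "working directory:".toList
    let f := PySem.Chars.find stripped marker
    if f = -1 then
      let r := PySem.Chars.rfind stripped ['\n']
      if r = -1 then String.ofList stripped
      else String.ofList (PySem.Chars.slice stripped (some (r + 1)) none)  -- stripped[r+1:]
    else
      let after := PySem.Chars.slice stripped (some (f + marker.length)) none  -- stripped[f+len(marker):]
      if PySem.Chars.isIn ['\n'] after then
        String.ofList (PySem.Chars.strip
          (PySem.Chars.slice after (some (PySem.Chars.find after ['\n'] + 1)) none))  -- after[after.find('\n')+1:].strip()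
      else ""

-- ===== PRECONDITION & SPEC =====
def Spec_extract_goose_output_py (goose_stdout : String) (out : String) : Prop := out = extract_goose_output_py_alt goose_stdout
instance (goose_stdout : String) (out : String) : Decidable (Spec_extract_goose_output_py goose_stdout out) := by unfold Spec_extract_goose_output_py; infer_instance

-- ===== CLAIM (what is proved, stated in full; the proofs are below) =====
def Claim_equal_extract_goose_output_py : Prop := ∀ (goose_stdout : String), Dom_extract_goose_output_py goose_stdout → Spec_extract_goose_output_py goose_stdout (extract_goose_output_py goose_stdout)

-- ===== LEMMAS AND PROOFS =====

/-- The line decomposition `s.split('\n')`, as a plain structural recursion (proof helper). -/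
def pvLines : List Char → List (List Char)
  | [] => [[]]
  | c :: rest =>
    if c = '\n' then [] :: pvLines rest
    else
      match pvLines rest with
      | [] => [[c]]
      | l :: ls => (c :: l) :: ls

/-- B's else-branch over `List Char` (proof helper). -/
def pvB (s : List Char) : List Char :=
  let m := "working directory:".toList
  let f := PySem.Chars.find s m
  if f = -1 then
    let r := PySem.Chars.rfind s ['\n']
    if r = -1 then s else s.drop (r + 1).toNat
  else
    let after := s.drop (f + m.length).toNat
    if PySem.Chars.isIn ['\n'] after then
      PySem.Chars.strip (after.drop (PySem.Chars.find after ['\n'] + 1).toNat)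
    else []



theorem pvLines_ne_nil (s : List Char) : pvLines s ≠ [] := by
  induction s with
  | nil => simp [pvLines]
  | cons c rest ih =>
    simp only [pvLines]
    split
    · simp
    · split
      · simp
      · simp

theorem pvLines_no_nl (s : List Char) : ∀ l ∈ pvLines s, '\n' ∉ l := by
  induction s with
  | nil => simp [pvLines]
  | cons c rest ih =>
    simp only [pvLines]
    split
    · intro l hl
      rcases List.mem_cons.1 hl with h | h
      · simp [h]
      · exact ih l h
    · rename_i hc
      split
      · rename_i heq
        exact absurd heq (pvLines_ne_nil rest)
      · rename_i l ls heq
        intro x hx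
        rcases List.mem_cons.1 hx with h | h
        · subst h
          simp only [List.mem_cons]
          rintro (h | h)
          · exact hc h.symm
          · exact ih l (heq ▸ List.mem_cons_self) h
        · exact ih x (heq ▸ List.mem_cons_of_mem _ h)

theorem pvLines_join (s : List Char) : PySem.Chars.join ['\n'] (pvLines s) = s := by
  induction s with
  | nil => simp [pvLines, PySem.Chars.join_singleton]
  | cons c rest ih =>
    simp only [pvLines]
    split
    · rename_i hc
      subst hc
      cases h : pvLines rest with
      | nil => exact absurd h (pvLines_ne_nil rest)
      | cons l ls =>
        rw [h] at ih
        rw [PySem.Chars.join_cons_cons]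
        simp [ih]
    · cases h : pvLines rest with
      | nil => exact absurd h (pvLines_ne_nil rest)
      | cons l ls =>
        rw [h] at ih
        cases ls with
        | nil => rw [PySem.Chars.join_singleton] at ih ⊢; simp [ih]
        | cons q qs =>
          rw [PySem.Chars.join_cons_cons] at ih ⊢
          simp [ih]

theorem pv_splitOn_go (fuel : Nat) (l cur : List Char) (acc : List (List Char))
    (h : l.length < fuel) :
    PySem.Chars.splitOn.go ['\n'] fuel l cur acc =
      acc.reverse ++
        (match pvLines l with
          | [] => [cur.reverse]
          | x :: xs => (cur.reverse ++ x) :: xs) := by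
  induction fuel generalizing l cur acc with
  | zero => omega
  | succ fuel ih =>
    cases l with
    | nil =>
      rw [PySem.Chars.splitOn.go.eq_def]
      simp [pvLines]
    | cons c rest =>
      rw [PySem.Chars.splitOn.go.eq_def]
      simp only []
      by_cases hc : c = '\n'
      · subst hc
        have hpre : List.isPrefixOf ['\n'] ('\n' :: rest) = true := by
          simp
        rw [if_pos hpre]
        simp only [List.length_cons] at h
        simp only [List.length_singleton, List.drop_one, List.tail_cons]
        rw [ih rest [] _ (by omega)]
        simp only [pvLines, if_pos]
        cases hp : pvLines rest with
        | nil => exact absurd hp (pvLines_ne_nil rest)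
        | cons x xs => simp
      · have hpre : ¬ List.isPrefixOf ['\n'] (c :: rest) = true := by
          simp only [List.isPrefixOf_iff_prefix]
          intro hp
          have : '\n' = c := by
            have := hp.getElem (i := 0) (by simp)
            simpa using this
          exact hc this.symm
        rw [if_neg hpre]
        simp only [List.length_cons] at h
        rw [ih rest (c :: cur) acc (by omega)]
        simp only [pvLines, if_neg hc]
        cases hp : pvLines rest with
        | nil => exact absurd hp (pvLines_ne_nil rest)
        | cons x xs => simp

theorem pv_splitOn_eq (s : List Char) : PySem.Chars.splitOn s ['\n'] = pvLines s := by
  rw [PySem.Chars.splitOn]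
  rw [pv_splitOn_go _ _ _ _ (by omega)]
  cases hp : pvLines s with
  | nil => exact absurd hp (pvLines_ne_nil s)
  | cons x xs => simp

theorem pv_singleton_infix (x : Char) (l : List Char) : [x] <:+: l ↔ x ∈ l := by
  constructor
  · rintro ⟨s, t, rfl⟩; simp
  · intro h
    rcases List.append_of_mem h with ⟨s, t, rfl⟩
    exact ⟨s, t, by simp⟩

theorem pv_prefix_through_nl (m a s' : List Char) (hm : '\n' ∉ m)
    (h : m <+: (a ++ '\n' :: s')) : m <+: a := by
  by_cases hlen : m.length ≤ a.length
  · have := List.prefix_take_iff.2 ⟨h, le_refl _⟩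
    rw [List.take_append_of_le_length hlen] at this
    exact this.trans (List.take_prefix _ _)
  · exfalso
    apply hm
    have : (a ++ '\n' :: s')[a.length]'(by simp) = '\n' := by
      simp
    have hget := List.IsPrefix.getElem h (i := a.length) (by omega)
    exact (hget.trans this) ▸ List.getElem_mem _


theorem pv_find_go (m l : List Char) (k : Nat) :
    PySem.Chars.find.go m l k =
      if PySem.Chars.find l m = -1 then -1 else k + PySem.Chars.find l m := by
  induction l generalizing k with
  | nil =>
    rw [PySem.Chars.find.go.eq_1]
    rw [PySem.Chars.find, PySem.Chars.find.go.eq_1]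
    split <;> simp_all
  | cons c t ih =>
    rw [PySem.Chars.find.go.eq_2]
    conv_rhs => rw [PySem.Chars.find, PySem.Chars.find.go.eq_2]
    by_cases hp : m.isPrefixOf (c :: t) = true
    · simp [hp]
    · rw [if_neg hp, if_neg hp, ih (k+1), ih 1]
      have := PySem.Chars.neg_one_le_find t m
      split <;> split <;> simp_all <;> omega


theorem pv_find_append (m a s' : List Char) (hm : m ≠ []) (hmn : '\n' ∉ m) (ha : '\n' ∉ a) :
    PySem.Chars.find (a ++ '\n' :: s') m =
      if PySem.Chars.find a m = -1 then
        (if PySem.Chars.find s' m = -1 then -1 else (a.length + 1) + PySem.Chars.find s' m)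
      else PySem.Chars.find a m := by
  induction a with
  | nil =>
    have h1 : PySem.Chars.find ([] : List Char) m = -1 := by
      rw [PySem.Chars.find, PySem.Chars.find.go.eq_1]
      simp [List.isEmpty_iff, hm]
    rw [h1, if_pos rfl]
    simp only [List.nil_append, List.length_nil]
    rw [PySem.Chars.find, PySem.Chars.find.go.eq_2]
    have hp : ¬ m.isPrefixOf ('\n' :: s') = true := by
      simp only [List.isPrefixOf_iff_prefix]
      intro hp
      cases m with
      | nil => exact hm rfl
      | cons x xs =>
        have := hp.getElem (i := 0) (by simp)
        simp at this
        exact hmn (by simp [this])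
    rw [if_neg hp, pv_find_go]
    split <;> simp_all
  | cons c a' ih =>
    simp only [List.mem_cons, not_or] at ha
    have ih' := ih ha.2
    simp only [List.cons_append]
    rw [PySem.Chars.find, PySem.Chars.find.go.eq_2]
    by_cases hp : m.isPrefixOf (c :: (a' ++ '\n' :: s')) = true
    · -- m is a prefix of the whole, hence of (c :: a')
      have hpa : m <+: (c :: a') := by
        apply pv_prefix_through_nl m (c :: a') s' hmn
        simpa [List.isPrefixOf_iff_prefix] using hp
      have hb := List.isPrefixOf_iff_prefix.2 hpa
      have hfa : PySem.Chars.find (c :: a') m = 0 := by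
        rw [PySem.Chars.find, PySem.Chars.find.go.eq_2]
        simp [hb]
      simp [hp, hfa]
    · rw [if_neg hp, pv_find_go]
      have hpc : ¬ m.isPrefixOf (c :: a') = true := by
        simp only [List.isPrefixOf_iff_prefix] at hp ⊢
        intro hx
        exact hp (hx.trans ⟨'\n' :: s', by simp⟩)
      have hfc : PySem.Chars.find (c :: a') m =
          if PySem.Chars.find a' m = -1 then -1 else 1 + PySem.Chars.find a' m := by
        rw [PySem.Chars.find, PySem.Chars.find.go.eq_2, if_neg hpc, pv_find_go]
        norm_num
      rw [ih', hfc]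
      have h1 := PySem.Chars.neg_one_le_find a' m
      have h2 := PySem.Chars.neg_one_le_find s' m
      simp only [List.length_cons]
      split <;> split <;> (try split) <;> simp_all <;> omega

theorem pv_find_nl (a s' : List Char) (ha : '\n' ∉ a) :
    PySem.Chars.find (a ++ '\n' :: s') ['\n'] = a.length := by
  induction a with
  | nil =>
    rw [List.nil_append, PySem.Chars.find, PySem.Chars.find.go.eq_2]
    rw [if_pos (by simp)]
    rfl
  | cons c a' ih =>
    simp only [List.mem_cons, not_or] at ha
    simp only [List.cons_append]
    rw [PySem.Chars.find, PySem.Chars.find.go.eq_2]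
    have hp : ¬ (['\n'].isPrefixOf (c :: (a' ++ '\n' :: s'))) = true := by
      simp only [List.isPrefixOf_iff_prefix]
      intro hx
      have := hx.getElem (i := 0) (by simp)
      simp at this
      exact ha.1 this
    rw [if_neg hp, pv_find_go, ih ha.2]
    rw [if_neg (by simp), List.length_cons]
    push_cast
    omega


theorem pv_rfind_go_zero (s sub : List Char) :
    PySem.Chars.rfind.go s sub 0 = if sub.isPrefixOf s = true then 0 else -1 := by
  rw [PySem.Chars.rfind.go.eq_def]

theorem pv_rfind_go_succ (s sub : List Char) (j : Nat) :
    PySem.Chars.rfind.go s sub (j + 1) =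
      if sub.isPrefixOf (List.drop (j + 1) s) = true then ((j : Int) + 1)
      else PySem.Chars.rfind.go s sub j := by
  rw [PySem.Chars.rfind.go.eq_def]
  push_cast
  rfl

theorem pv_rfind_go_none (t : List Char) (j : Nat) (h : '\n' ∉ t) :
    PySem.Chars.rfind.go t ['\n'] j = -1 := by
  induction j with
  | zero =>
    rw [pv_rfind_go_zero, if_neg]
    simp only [List.isPrefixOf_iff_prefix]
    intro hx
    cases t with
    | nil => simp at hx
    | cons c r =>
      have := hx.getElem (i := 0) (by simp)
      simp at this
      exact h (by simp [← this])
  | succ j ih =>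
    rw [pv_rfind_go_succ, if_neg, ih]
    simp only [List.isPrefixOf_iff_prefix]
    intro hx
    cases hd : List.drop (j + 1) t with
    | nil => rw [hd] at hx; simp at hx
    | cons c r =>
      rw [hd] at hx
      have := hx.getElem (i := 0) (by simp)
      simp at this
      apply h
      rw [this]
      exact List.mem_of_mem_drop (hd ▸ List.mem_cons_self)

theorem pv_neg_one_le_rfind_go (s sub : List Char) (j : Nat) :
    -1 ≤ PySem.Chars.rfind.go s sub j := by
  induction j with
  | zero => rw [pv_rfind_go_zero]; split <;> omega
  | succ j ih =>
    rw [pv_rfind_go_succ]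
    split
    · omega
    · exact ih

theorem pv_rfind_go_at (a s' : List Char) :
    PySem.Chars.rfind.go (a ++ '\n' :: s') ['\n'] a.length = (a.length : Int) := by
  have hdropnl : List.drop a.length (a ++ '\n' :: s') = '\n' :: s' := by
    rw [List.drop_append_of_le_length (le_refl _)]
    simp
  cases hl : a.length with
  | zero =>
    have ha0 : a = [] := List.length_eq_zero_iff.1 hl
    subst ha0
    rw [pv_rfind_go_zero, if_pos (by simp)]
    simp
  | succ k =>
    rw [pv_rfind_go_succ, show k + 1 = a.length from hl.symm, hdropnl]
    rw [if_pos (by simp)]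
    omega

theorem pv_rfind_go_append (a s' : List Char) (j : Nat) :
    PySem.Chars.rfind.go (a ++ '\n' :: s') ['\n'] (a.length + 1 + j) =
      if PySem.Chars.rfind.go s' ['\n'] j = -1 then (a.length : Int)
      else a.length + 1 + PySem.Chars.rfind.go s' ['\n'] j := by
  have hdrop : ∀ i : Nat, List.drop (a.length + 1 + i) (a ++ '\n' :: s') = List.drop i s' := by
    intro i
    have h0 : a ++ '\n' :: s' = (a ++ ['\n']) ++ s' := by simp
    have h2 : a.length + 1 + i - (a ++ ['\n']).length = i := by simp
    rw [h0, List.drop_append, h2, List.drop_of_length_le (by simp), List.nil_append]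
  induction j with
  | zero =>
    rw [show a.length + 1 + 0 = a.length + 1 from rfl]
    rw [pv_rfind_go_succ, show a.length + 1 = a.length + 1 + 0 from rfl, hdrop 0, List.drop_zero]
    rw [pv_rfind_go_zero]
    by_cases hp : (['\n'].isPrefixOf s') = true
    · rw [if_pos hp, if_pos hp, if_neg (by omega)]
      omega
    · rw [if_neg hp, if_neg hp, if_pos rfl]
      exact pv_rfind_go_at a s'
  | succ j ih =>
    rw [show a.length + 1 + (j + 1) = (a.length + 1 + j) + 1 by omega]
    rw [pv_rfind_go_succ, show a.length + 1 + j + 1 = a.length + 1 + (j + 1) by omega, hdrop (j + 1)]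
    conv_rhs => rw [pv_rfind_go_succ]
    by_cases hp : (['\n'].isPrefixOf (List.drop (j + 1) s')) = true
    · rw [if_pos hp, if_pos hp, if_neg (by omega)]
      push_cast
      omega
    · rw [if_neg hp, if_neg hp, ih]

theorem pv_rfind_append (a s' : List Char) :
    PySem.Chars.rfind (a ++ '\n' :: s') ['\n'] =
      if PySem.Chars.rfind s' ['\n'] = -1 then (a.length : Int)
      else a.length + 1 + PySem.Chars.rfind s' ['\n'] := by
  rw [PySem.Chars.rfind, PySem.Chars.rfind]
  have h : (a ++ '\n' :: s').length = a.length + 1 + s'.length := by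
    simp
    omega
  rw [h]
  exact pv_rfind_go_append a s' s'.length

theorem pv_last_cons (a : List Char) (L : List (List Char)) (h : L ≠ []) :
    (PySem.List.pyGet? (a :: L) (-1)).getD [] = (PySem.List.pyGet? L (-1)).getD [] := by
  cases L with
  | nil => exact absurd rfl h
  | cons b L' =>
    simp only [PySem.List.pyGet?, PySem.List.pyIdx?]
    norm_num
    rfl

theorem pv_last_single (a : List Char) : (PySem.List.pyGet? [a] (-1)).getD [] = a := by
  simp [PySem.List.pyGet?, PySem.List.pyIdx?]

theorem pv_drop_shift (a s' : List Char) (i : Nat) :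
    List.drop (a.length + 1 + i) (a ++ '\n' :: s') = List.drop i s' := by
  have h0 : a ++ '\n' :: s' = (a ++ ['\n']) ++ s' := by simp
  have h2 : a.length + 1 + i - (a ++ ['\n']).length = i := by simp
  rw [h0, List.drop_append, h2, List.drop_of_length_le (by simp), List.nil_append]

theorem pv_find_join_none (m : List Char) (hm : m ≠ []) (hmn : '\n' ∉ m)
    (L : List (List Char)) (hnl : ∀ l ∈ L, '\n' ∉ l) :
    PySem.Chars.find (PySem.Chars.join ['\n'] L) m = -1 ↔
      ∀ l ∈ L, PySem.Chars.isIn m l = false := by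
  induction L with
  | nil =>
    simp only [List.not_mem_nil, false_implies, implies_true, iff_true]
    rw [PySem.Chars.join_nil, PySem.Chars.find, PySem.Chars.find.go.eq_1]
    simp [List.isEmpty_iff, hm]
  | cons a L' ih =>
    have ha : '\n' ∉ a := hnl a List.mem_cons_self
    have ih' := ih (fun l hl => hnl l (List.mem_cons_of_mem _ hl))
    cases L' with
    | nil =>
      rw [PySem.Chars.join_singleton]
      simp [PySem.Chars.isIn]
    | cons b R =>
      have hj : PySem.Chars.join ['\n'] (a :: b :: R) =
          a ++ '\n' :: PySem.Chars.join ['\n'] (b :: R) := by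
        rw [PySem.Chars.join_cons_cons]; simp
      rw [hj, pv_find_append m a _ hm hmn ha]
      have h1 := PySem.Chars.neg_one_le_find a m
      have h2 := PySem.Chars.neg_one_le_find (PySem.Chars.join ['\n'] (b :: R)) m
      constructor
      · intro hx l hl
        have hax : PySem.Chars.find a m = -1 ∧
            PySem.Chars.find (PySem.Chars.join ['\n'] (b :: R)) m = -1 := by
          by_cases c1 : PySem.Chars.find a m = -1
          · rw [if_pos c1] at hx
            by_cases c2 : PySem.Chars.find (PySem.Chars.join ['\n'] (b :: R)) m = -1
            · exact ⟨c1, c2⟩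
            · rw [if_neg c2] at hx; omega
          · rw [if_neg c1] at hx; omega
        rcases List.mem_cons.1 hl with rfl | hl
        · simp [PySem.Chars.isIn, hax.1]
        · exact (ih'.1 hax.2) l hl
      · intro hx
        have ha1 : PySem.Chars.find a m = -1 := by
          have := hx a List.mem_cons_self
          simpa [PySem.Chars.isIn, bne_iff_ne] using this
        have ha2 : PySem.Chars.find (PySem.Chars.join ['\n'] (b :: R)) m = -1 :=
          ih'.2 (fun l hl => hx l (List.mem_cons_of_mem _ hl))
        rw [if_pos ha1, if_pos ha2]

theorem pv_main (L : List (List Char)) (hne : L ≠ []) (hnl : ∀ l ∈ L, '\n' ∉ l) :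
    (match L.findIdx? (fun line => PySem.Chars.isIn "working directory:".toList line) with
      | some idx => PySem.Chars.strip (PySem.Chars.join ['\n'] (L.drop (idx + 1)))
      | none => (PySem.List.pyGet? L (-1)).getD [])
    = pvB (PySem.Chars.join ['\n'] L) := by
  have hm : ("working directory:".toList) ≠ [] := by decide
  have hmn : '\n' ∉ "working directory:".toList := by decide
  induction L with
  | nil => exact absurd rfl hne
  | cons a L' ih =>
    have ha : '\n' ∉ a := hnl a List.mem_cons_self
    cases L' with
    | nil =>
      rw [PySem.Chars.join_singleton]
      cases hp : PySem.Chars.isIn "working directory:".toList a with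
      | true =>
        simp only [List.findIdx?_cons, hp, if_true, List.findIdx?_nil]
        have hfne : PySem.Chars.find a "working directory:".toList ≠ -1 := by
          simpa [PySem.Chars.isIn, bne_iff_ne] using hp
        simp only [pvB]
        rw [if_neg hfne]
        have hIn : PySem.Chars.isIn ['\n']
            (List.drop (PySem.Chars.find a "working directory:".toList +
              ↑"working directory:".toList.length).toNat a) = false := by
          rw [PySem.Chars.isIn_eq_false_iff]
          intro hx
          exact ha (List.mem_of_mem_drop ((pv_singleton_infix _ _).1 hx))
        rw [if_neg (by rw [hIn]; exact Bool.false_ne_true)]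
        simp [PySem.Chars.join_nil, PySem.Chars.strip, PySem.Chars.lstrip, PySem.Chars.rstrip]
      | false =>
        simp only [List.findIdx?_cons, hp, Bool.false_eq_true, if_false, List.findIdx?_nil,
          Option.map_none]
        rw [pv_last_single]
        simp only [pvB]
        have hf : PySem.Chars.find a "working directory:".toList = -1 := by
          simpa [PySem.Chars.isIn, bne_eq_false_iff_eq] using hp
        rw [if_pos hf]
        have hr : PySem.Chars.rfind a ['\n'] = -1 := by
          rw [PySem.Chars.rfind]; exact pv_rfind_go_none a _ ha
        rw [if_pos hr]
    | cons b R =>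
      have hnl' : ∀ l ∈ b :: R, '\n' ∉ l := fun l hl => hnl l (List.mem_cons_of_mem _ hl)
      have ih' := ih (by simp) hnl'
      have hj : PySem.Chars.join ['\n'] (a :: b :: R) =
          a ++ '\n' :: PySem.Chars.join ['\n'] (b :: R) := by
        rw [PySem.Chars.join_cons_cons]; simp
      rw [hj]
      cases hp : PySem.Chars.isIn "working directory:".toList a with
      | true =>
        simp only [List.findIdx?_cons, hp, if_true]
        have hfne : PySem.Chars.find a "working directory:".toList ≠ -1 := by
          simpa [PySem.Chars.isIn, bne_iff_ne] using hp
        have hf0 : 0 ≤ PySem.Chars.find a "working directory:".toList := by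
          have := PySem.Chars.neg_one_le_find a "working directory:".toList
          omega
        obtain ⟨spec1, -⟩ := PySem.Chars.find_spec (s := a) (sub := "working directory:".toList) hf0
        have hmlen : 0 < "working directory:".toList.length := by decide
        have hlen : (PySem.Chars.find a "working directory:".toList).toNat +
            "working directory:".toList.length ≤ a.length := by
          have h1 := spec1.length_le
          rw [List.length_drop] at h1
          omega
        simp only [pvB]
        rw [pv_find_append _ a _ hm hmn ha, if_neg hfne, if_neg hfne]
        rw [show (PySem.Chars.find a "working directory:".toList +
            ↑"working directory:".toList.length).toNat =
          (PySem.Chars.find a "working directory:".toList).toNat +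
            "working directory:".toList.length by omega]
        rw [List.drop_append_of_le_length hlen]
        have hu : '\n' ∉ List.drop ((PySem.Chars.find a "working directory:".toList).toNat +
            "working directory:".toList.length) a :=
          fun hx => ha (List.mem_of_mem_drop hx)
        have hInT : PySem.Chars.isIn ['\n']
            (List.drop ((PySem.Chars.find a "working directory:".toList).toNat +
              "working directory:".toList.length) a ++
              '\n' :: PySem.Chars.join ['\n'] (b :: R)) = true := by
          rw [PySem.Chars.isIn_iff_infix]
          exact (pv_singleton_infix _ _).2 (by simp)
        rw [if_pos hInT, pv_find_nl _ _ hu]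
        rw [show ((List.drop ((PySem.Chars.find a "working directory:".toList).toNat +
            "working directory:".toList.length) a).length : Int) + 1 =
          ((List.drop ((PySem.Chars.find a "working directory:".toList).toNat +
            "working directory:".toList.length) a).length + 1 : Nat) by push_cast; ring]
        rw [Int.toNat_natCast]
        rw [show List.drop ((PySem.Chars.find a "working directory:".toList).toNat +
              "working directory:".toList.length) a ++
              '\n' :: PySem.Chars.join ['\n'] (b :: R) =
            (List.drop ((PySem.Chars.find a "working directory:".toList).toNat +
              "working directory:".toList.length) a ++ ['\n']) ++
              PySem.Chars.join ['\n'] (b :: R) by simp]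
        rw [List.drop_left' (by simp)]
        rfl
      | false =>
        rw [List.findIdx?_cons]
        simp only [hp, Bool.false_eq_true, if_false]
        have hfa : PySem.Chars.find a "working directory:".toList = -1 := by
          simpa [PySem.Chars.isIn, bne_eq_false_iff_eq] using hp
        cases hidx : (b :: R).findIdx? (fun line => PySem.Chars.isIn "working directory:".toList line) with
        | none =>
          simp only [Option.map_none]
          rw [hidx] at ih'
          have ih2 : (PySem.List.pyGet? (b :: R) (-1)).getD [] =
              pvB (PySem.Chars.join ['\n'] (b :: R)) := ih'
          have hJnone : PySem.Chars.find (PySem.Chars.join ['\n'] (b :: R))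
              "working directory:".toList = -1 :=
            (pv_find_join_none _ hm hmn _ hnl').2 (List.findIdx?_eq_none_iff.1 hidx)
          rw [pv_last_cons a _ (by simp), ih2]
          simp only [pvB]
          simp only [pv_find_append _ a _ hm hmn ha, if_pos hfa, if_pos hJnone,
            pv_rfind_append a _, if_true]
          by_cases hr : PySem.Chars.rfind (PySem.Chars.join ['\n'] (b :: R)) ['\n'] = -1
          · simp only [if_pos hr, if_neg (show ¬((a.length : Int) = -1) by omega)]
            rw [show ((a.length : Int) + 1).toNat = a.length + 1 by omega]
            have := pv_drop_shift a (PySem.Chars.join ['\n'] (b :: R)) 0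
            rw [List.drop_zero] at this
            rw [this]
          · simp only [if_neg hr]
            have hr0 : 0 ≤ PySem.Chars.rfind (PySem.Chars.join ['\n'] (b :: R)) ['\n'] := by
              have h2 : -1 ≤ PySem.Chars.rfind (PySem.Chars.join ['\n'] (b :: R)) ['\n'] := by
                rw [PySem.Chars.rfind]; exact pv_neg_one_le_rfind_go _ _ _
              omega
            rw [if_neg (by omega)]
            obtain ⟨k, hk⟩ := Int.eq_ofNat_of_zero_le hr0
            rw [hk]
            rw [show ((a.length : Int) + 1 + ↑k + 1).toNat = a.length + 1 + (k + 1) by omega]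
            rw [show ((k : Int) + 1).toNat = k + 1 by omega]
            rw [pv_drop_shift]
        | some i =>
          simp only [Option.map_some]
          rw [hidx] at ih'
          have ih2 : PySem.Chars.strip (PySem.Chars.join ['\n'] (List.drop (i + 1) (b :: R))) =
              pvB (PySem.Chars.join ['\n'] (b :: R)) := ih'
          have hJsome : PySem.Chars.find (PySem.Chars.join ['\n'] (b :: R))
              "working directory:".toList ≠ -1 := by
            intro hc
            have hall := (pv_find_join_none _ hm hmn _ hnl').1 hc
            rw [← List.findIdx?_eq_none_iff (p := fun line =>
              PySem.Chars.isIn "working directory:".toList line)] at hall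
            rw [hidx] at hall
            exact Option.some_ne_none _ hall
          have hJ0 : 0 ≤ PySem.Chars.find (PySem.Chars.join ['\n'] (b :: R))
              "working directory:".toList := by
            have := PySem.Chars.neg_one_le_find (PySem.Chars.join ['\n'] (b :: R))
              "working directory:".toList
            omega
          simp only [pvB] at ih2 ⊢
          rw [pv_find_append _ a _ hm hmn ha, if_pos hfa, if_neg hJsome, if_neg (by omega)]
          rw [if_neg hJsome] at ih2
          rw [show ((a.length : Int) + 1 + PySem.Chars.find (PySem.Chars.join ['\n'] (b :: R))
              "working directory:".toList + ↑"working directory:".toList.length).toNat =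
            a.length + 1 + ((PySem.Chars.find (PySem.Chars.join ['\n'] (b :: R))
              "working directory:".toList + ↑"working directory:".toList.length).toNat) by omega]
          rw [pv_drop_shift]
          rw [List.drop_succ_cons]
          exact ih2

theorem pv_alt_eq (s : String) (h : ¬ (PySem.Str.strip s).toList.isEmpty = true) :
    extract_goose_output_py_alt s = String.ofList (pvB (PySem.Str.strip s).toList) := by
  simp only [extract_goose_output_py_alt, pvB]
  rw [if_neg h]
  by_cases hf : PySem.Chars.find (PySem.Str.strip s).toList "working directory:".toList = -1
  · rw [if_pos hf, if_pos hf]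
    by_cases hr : PySem.Chars.rfind (PySem.Str.strip s).toList ['\n'] = -1
    · rw [if_pos hr, if_pos hr]
    · rw [if_neg hr, if_neg hr]
      have hge : -1 ≤ PySem.Chars.rfind (PySem.Str.strip s).toList ['\n'] := by
        rw [PySem.Chars.rfind]; exact pv_neg_one_le_rfind_go _ _ _
      rw [PySem.Chars.slice_eq_listSlice, PySem.List.slice_from _ (by omega)]
  · rw [if_neg hf, if_neg hf]
    have hge : -1 ≤ PySem.Chars.find (PySem.Str.strip s).toList "working directory:".toList :=
      PySem.Chars.neg_one_le_find _ _
    rw [PySem.Chars.slice_eq_listSlice, PySem.List.slice_from _ (by omega)]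
    have hge2 := PySem.Chars.neg_one_le_find
      (List.drop (PySem.Chars.find (PySem.Str.strip s).toList "working directory:".toList +
        ↑"working directory:".toList.length).toNat (PySem.Str.strip s).toList) ['\n']
    rw [PySem.Chars.slice_eq_listSlice, PySem.List.slice_from _ (by omega)]
    split <;> rfl

-- ===== VERDICT (by name: the statement is the Claim_ definition above) =====
theorem extract_goose_output_py_spec : Claim_equal_extract_goose_output_py := by
  intro s _
  unfold Spec_extract_goose_output_py
  by_cases h : (PySem.Str.strip s).toList.isEmpty = true
  · simp only [extract_goose_output_py, extract_goose_output_py_alt, h, if_pos]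
  · rw [pv_alt_eq s h]
    simp only [extract_goose_output_py, h, if_neg, Bool.false_eq_true, not_false_iff]
    rw [pv_splitOn_eq]
    have hmain := pv_main (pvLines (PySem.Str.strip s).toList) (pvLines_ne_nil _) (pvLines_no_nl _)
    rw [pvLines_join] at hmain
    cases hidx : (pvLines (PySem.Str.strip s).toList).findIdx?
        (fun line => PySem.Chars.isIn "working directory:".toList line) with
    | none => rw [hidx] at hmain; simp only [hmain]
    | some idx => rw [hidx] at hmain; simp only [hmain]
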